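-- pv_equiv track=rewrite | github.com/Simon220902/Coding-Pirates-Python-projekter | 2048/2048 pygame/nylivelogik.py | roterVenstre
-- ===== SOURCE A (Python) =====
-- def roterVenstre(bræt):
-- 	#Det nye bræt
-- 	nytBræt = []
-- 	for i in range(4):
-- 		kolTilRække = []
-- 		for j in range(4):
-- 			#Vi tager den kolonne yderst til højre og sætter som første række
-- 			#og så den næst yderste kolonne til højre og sætter den som anden osv.
-- 			kolTilRække.append(bræt[j][3-i])
-- 		#Vi tilføjer rækken der før var en kolonne til brættet
-- 		nytBræt.append(kolTilRække)
-- 	return nytBræt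
-- ===== SOURCE B (Python) =====
-- def roterVenstre(bræt):
-- 	# In-place layered ring rotation: copy the 4x4, then for each ring
-- 	# rotate four cells at a time counter-clockwise with a temporary.
-- 	n = 4
-- 	a = [[bræt[i][j] for j in range(n)] for i in range(n)]
-- 	for i in range(n // 2):
-- 		for j in range(i, n - 1 - i):
-- 			tmp = a[i][j]
-- 			a[i][j] = a[j][n - 1 - i]
-- 			a[j][n - 1 - i] = a[n - 1 - i][n - 1 - j]
-- 			a[n - 1 - i][n - 1 - j] = a[n - 1 - j][i]
-- 			a[n - 1 - j][i] = tmp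
-- 	return a
-- ===== Notes on version B (the rewrite author's own statement) =====
-- stated objective: alternative
-- what changed: B copies the first 4x4 of the board and then rotates it in place by cycling four cells at a time around each concentric ring with a temporary, instead of A's gathering each reversed column into a new row
import Mathlib
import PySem

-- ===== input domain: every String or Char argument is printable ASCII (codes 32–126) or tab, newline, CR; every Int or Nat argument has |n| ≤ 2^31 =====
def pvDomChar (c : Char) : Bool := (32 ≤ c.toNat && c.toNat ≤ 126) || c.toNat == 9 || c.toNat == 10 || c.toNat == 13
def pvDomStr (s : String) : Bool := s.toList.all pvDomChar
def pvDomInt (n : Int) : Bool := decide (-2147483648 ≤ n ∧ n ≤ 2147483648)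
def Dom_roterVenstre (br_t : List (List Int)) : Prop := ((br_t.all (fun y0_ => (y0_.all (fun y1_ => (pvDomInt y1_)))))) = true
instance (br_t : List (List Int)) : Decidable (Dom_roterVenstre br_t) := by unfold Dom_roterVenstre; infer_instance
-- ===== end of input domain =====

-- B rotates the fixed 4x4 board by copying it and cycling four cells at a time
-- around each ring in place, instead of A's direct gather of reversed columns;
-- alternative decomposition, same values.

-- ===== PORT A =====
-- A: for i in range(4): row = [bræt[j][3-i] for j in range(4)] (built by appends)
def roterVenstre (br_t : List (List Int)) : List (List Int) :=
  (PySem.List.pyRange 0 4 1).foldl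
    (fun nytBræt i =>
      nytBræt ++ [ (PySem.List.pyRange 0 4 1).foldl
        (fun kolTilRække j =>
          kolTilRække ++ [PySem.List.pyGetD (PySem.List.pyGetD br_t j []) (3 - i) 0]) [] ]) []

-- ===== PORT B =====
-- read a[x][y] (exact: Python indexing, default never reached on admitted inputs)
def pvGet2 (a : List (List Int)) (x y : Int) : Int :=
  PySem.List.pyGetD (PySem.List.pyGetD a x []) y 0
-- write a[x][y] = v; exact for the nonnegative in-range indices B actually uses
def pvSet2 (a : List (List Int)) (x y : Int) (v : Int) : List (List Int) :=
  a.set x.toNat ((a.getD x.toNat []).set y.toNat v)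
-- one four-cell counter-clockwise cycle of the ring at (i, j), n = 4
def pvCycle (a : List (List Int)) (i j : Int) : List (List Int) :=
  let tmp := pvGet2 a i j
  let a := pvSet2 a i j (pvGet2 a j (3 - i))
  let a := pvSet2 a j (3 - i) (pvGet2 a (3 - i) (3 - j))
  let a := pvSet2 a (3 - i) (3 - j) (pvGet2 a (3 - j) i)
  pvSet2 a (3 - j) i tmp
-- B: copy first 4x4, then rotate each ring in place by four-cell cycles
def roterVenstre_alt (br_t : List (List Int)) : List (List Int) :=
  let a := (PySem.List.pyRange 0 4 1).map (fun i =>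
    (PySem.List.pyRange 0 4 1).map (fun j =>
      PySem.List.pyGetD (PySem.List.pyGetD br_t i []) j 0))
  (PySem.List.pyRange 0 2 1).foldl
    (fun a i =>
      (PySem.List.pyRange i (3 - i) 1).foldl (fun a j => pvCycle a i j) a) a

-- ===== PRECONDITION & SPEC =====
-- Pre_ excludes exactly the boards where Python A raises IndexError:
-- fewer than 4 rows, or one of the first 4 rows shorter than 4.
def Pre_roterVenstre (br_t : List (List Int)) : Prop :=
  4 ≤ br_t.length ∧ ∀ r ∈ br_t.take 4, 4 ≤ r.length
instance (br_t : List (List Int)) : Decidable (Pre_roterVenstre br_t) := by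
  unfold Pre_roterVenstre; infer_instance
def pvWitness_roterVenstre : List (List Int) :=
  [[1, 2, 3, 4], [5, 6, 7, 8], [9, 10, 11, 12], [13, 14, 15, 16]]
def Spec_roterVenstre (br_t : List (List Int)) (out : List (List Int)) : Prop := out = roterVenstre_alt br_t
instance (br_t : List (List Int)) (out : List (List Int)) : Decidable (Spec_roterVenstre br_t out) := by unfold Spec_roterVenstre; infer_instance

-- ===== CLAIM (what is proved, stated in full; the proofs are below) =====
def Claim_equal_roterVenstre : Prop := ∀ (br_t : List (List Int)), Dom_roterVenstre br_t → Pre_roterVenstre br_t → Spec_roterVenstre br_t (roterVenstre br_t)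

-- ===== LEMMAS AND PROOFS =====

-- the ring-cycle phase on a literal 4x4 board is the counter-clockwise rotation
lemma ring_lit (v00 v01 v02 v03 v10 v11 v12 v13 v20 v21 v22 v23 v30 v31 v32 v33 : Int) :
    (PySem.List.pyRange 0 2 1).foldl
      (fun a i => (PySem.List.pyRange i (3 - i) 1).foldl (fun a j => pvCycle a i j) a)
      [[v00, v01, v02, v03], [v10, v11, v12, v13], [v20, v21, v22, v23], [v30, v31, v32, v33]] =
    [[v03, v13, v23, v33], [v02, v12, v22, v32], [v01, v11, v21, v31], [v00, v10, v20, v30]] := by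
  simp [PySem.List.pyRange, List.range_succ, pvCycle, pvSet2, pvGet2,
        PySem.List.pyGetD, PySem.List.pyGet?, PySem.List.pyIdx?]

-- ===== VERDICT (by name: the statement is the Claim_ definition above) =====
theorem roterVenstre_spec : Claim_equal_roterVenstre := by
  intro br_t _ _
  unfold Spec_roterVenstre roterVenstre roterVenstre_alt
  have hcopy : (PySem.List.pyRange 0 4 1).map (fun i =>
      (PySem.List.pyRange 0 4 1).map (fun j =>
        PySem.List.pyGetD (PySem.List.pyGetD br_t i []) j 0)) =
      [[pvGet2 br_t 0 0, pvGet2 br_t 0 1, pvGet2 br_t 0 2, pvGet2 br_t 0 3],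
       [pvGet2 br_t 1 0, pvGet2 br_t 1 1, pvGet2 br_t 1 2, pvGet2 br_t 1 3],
       [pvGet2 br_t 2 0, pvGet2 br_t 2 1, pvGet2 br_t 2 2, pvGet2 br_t 2 3],
       [pvGet2 br_t 3 0, pvGet2 br_t 3 1, pvGet2 br_t 3 2, pvGet2 br_t 3 3]] := by
    simp [PySem.List.pyRange, pvGet2, List.range_succ]
  rw [hcopy, ring_lit]
  simp [PySem.List.pyRange, pvGet2, List.range_succ]
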